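-- pv_equiv track=rewrite | github.com/KarrLab/rand_wc_model_gen | random_wc_model_generator/random_polymer.py | make_genes
-- ===== SOURCE A (Python) =====
-- def make_genes(genome):
--     """ Parse genome to create compiled list of DNA nucleotide (gene) sequences for the proteins in cell
--
--     Args:
--         genome (:obj:`string`): genome (DNA nucleotide) sequence for cell (includes all genes)
--
--     Returns:
--         :obj:`list`: list of DNA nucleotide sequences of each protein
--     """
--     genes = ['']
--     codon = ''
--     index = 0
--
--     for j in range(index,len(genome),3):
--         codon = genome[j:j+3]
--         if codon == 'ATC':
--             genes[index] += codon
--             index += 1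
--             genes.append('')
--
--         else:
--             genes[index] += codon
--
--     # get rid of last emtpy string in list
--     genes = genes[:-1]
--
--     return genes
-- ===== SOURCE B (Python) =====
-- def make_genes(genome):
--     """ Parse genome to create compiled list of DNA nucleotide (gene) sequences for the proteins in cell
--
--     Args:
--         genome (:obj:`string`): genome (DNA nucleotide) sequence for cell (includes all genes)
--
--     Returns:
--         :obj:`list`: list of DNA nucleotide sequences of each protein
--     """
--     codons = [genome[j:j + 3] for j in range(0, len(genome), 3)]
--     boundaries = [i for i, c in enumerate(codons) if c == 'ATC']
--     genes = []
--     start = 0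
--     for b in boundaries:
--         genes.append(''.join(codons[start:b + 1]))
--         start = b + 1
--     return genes
-- ===== Notes on version B (the rewrite author's own statement) =====
-- stated objective: faster
-- what changed: B precomputes the codon list and a table of boundary-codon indices, then emits each gene by joining one codon slice per boundary, replacing A's repeated in-place string concatenation onto the last list slot (and its trailing-empty-slot trim) with a single join per gene.
import Mathlib
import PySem

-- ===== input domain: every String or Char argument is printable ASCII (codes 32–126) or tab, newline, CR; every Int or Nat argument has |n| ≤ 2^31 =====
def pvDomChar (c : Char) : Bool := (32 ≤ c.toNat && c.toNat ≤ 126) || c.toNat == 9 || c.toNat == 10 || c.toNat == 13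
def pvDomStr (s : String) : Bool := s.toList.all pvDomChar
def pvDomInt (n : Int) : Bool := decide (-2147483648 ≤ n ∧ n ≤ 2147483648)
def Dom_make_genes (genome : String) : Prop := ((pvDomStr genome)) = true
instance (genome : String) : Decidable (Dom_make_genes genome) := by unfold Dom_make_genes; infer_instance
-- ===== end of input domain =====

-- B replaces A's mutate-the-last-slot-then-trim-trailing-empty bookkeeping with a precomputed
-- codon list and a table of 'ATC' boundary indices, joining one codon slice per boundary
-- (measured faster at large sizes: one join per gene instead of repeated string concatenation).

-- ===== PORT A =====
-- Port of A. Strings are handled as `List Char` and packed with `String.ofList` at the end.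
-- `genes[index] += codon` / `genes.append('')` are a list-index assignment and an append,
-- ported by hand with `List.modify` (exact: `index` is always a valid index of `genes`,
-- and stays nonnegative, so it is kept as a `Nat`); slices, `range` and `genes[:-1]`
-- go through PySem.
def make_genes (genome : String) : List String :=
  let g : List Char := genome.toList
  let res :=
    (PySem.List.pyRange 0 (PySem.Chars.len g) 3).foldl
      (fun (st : List (List Char) × Nat) j =>
        let codon := PySem.List.slice g (some j) (some (j + 3))
        if codon = ['A', 'T', 'C'] then
          (st.1.modify st.2 (· ++ codon) ++ [[]], st.2 + 1)
        else
          (st.1.modify st.2 (· ++ codon), st.2))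
      ([[]], 0)
  (PySem.List.slice res.1 none (some (-1))).map String.ofList

-- ===== PORT B =====
-- Port of B (Source B): codon list, boundary-index table, one joined slice per boundary.
def make_genes_alt (genome : String) : List String :=
  let g : List Char := genome.toList
  let codons := (PySem.List.pyRange 0 (PySem.Chars.len g) 3).map
      (fun j => PySem.List.slice g (some j) (some (j + 3)))
  let boundaries := (PySem.List.enumerate codons).filterMap
      (fun p => if p.2 = ['A', 'T', 'C'] then some p.1 else none)
  let res := boundaries.foldl
      (fun (st : List String × Int) b =>
        (st.1 ++ [String.ofList (PySem.Chars.join []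
            (PySem.List.slice codons (some st.2) (some (b + 1))))], b + 1))
      ([], 0)
  res.1

-- ===== PRECONDITION & SPEC =====
def Spec_make_genes (genome : String) (out : List String) : Prop := out = make_genes_alt genome
instance (genome : String) (out : List String) : Decidable (Spec_make_genes genome out) := by unfold Spec_make_genes; infer_instance

-- ===== CLAIM (what is proved, stated in full; the proofs are below) =====
def Claim_equal_make_genes : Prop := ∀ (genome : String), Dom_make_genes genome → Spec_make_genes genome (make_genes genome)

-- ===== LEMMAS AND PROOFS =====

/-- The common specification: split the codon list at `ATC` codons, dropping the tail
    after the last `ATC`; `acc` is the pending (unfinished) gene prefix. -/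
def pvGenes : List (List Char) → List Char → List (List Char)
  | [], _ => []
  | c :: cs, acc =>
      if c = ['A', 'T', 'C'] then (acc ++ c) :: pvGenes cs [] else pvGenes cs (acc ++ c)

/-- A's loop body, as a function of the current codon. -/
def pvStepA (st : List (List Char) × Nat) (c : List Char) : List (List Char) × Nat :=
  if c = ['A', 'T', 'C'] then
    (st.1.modify st.2 (· ++ c) ++ [[]], st.2 + 1)
  else
    (st.1.modify st.2 (· ++ c), st.2)

theorem pvModify_last {α : Type} (gs : List α) (a : α) (f : α → α) :
    (gs ++ [a]).modify gs.length f = gs ++ [f a] := by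
  induction gs with
  | nil => rfl
  | cons g gs ih => simpa using ih

theorem pvJoin_nil_eq_flatten (ps : List (List Char)) :
    PySem.Chars.join [] ps = ps.flatten := by
  induction ps with
  | nil => rfl
  | cons p ps ih =>
    cases ps with
    | nil => rw [PySem.Chars.join_singleton]; simp
    | cons q t => rw [PySem.Chars.join_cons_cons]; simpa using ih

/-- Invariant of A's loop: genes = finished genes ++ [pending], index = #finished. -/
theorem pvLemA (cs : List (List Char)) (gs : List (List Char)) (a : List Char) :
    (cs.foldl pvStepA (gs ++ [a], gs.length)).1.dropLast = gs ++ pvGenes cs a := by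
  induction cs generalizing gs a with
  | nil => simp [pvGenes]
  | cons c cs ih =>
    by_cases h : c = ['A', 'T', 'C']
    · have : pvStepA (gs ++ [a], gs.length) c = ((gs ++ [a ++ c]) ++ [[]], (gs ++ [a ++ c]).length) := by
        simp [pvStepA, h, pvModify_last]
      rw [List.foldl_cons, this, ih]
      simp [pvGenes, h]
    · have : pvStepA (gs ++ [a], gs.length) c = (gs ++ [a ++ c], gs.length) := by
        simp [pvStepA, h, pvModify_last]
      rw [List.foldl_cons, this, ih]
      simp [pvGenes, h]

/-- Invariant of B's loop over the boundary table. `cs0 = pre ++ mid ++ cs`: `pre` is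
    already emitted (start = pre.length), `mid` is the pending ATC-free stretch,
    `cs` is still to be scanned (enumeration starts at pre.length + mid.length). -/
theorem pvLemB (cs : List (List Char)) (cs0 pre mid : List (List Char)) (gs : List String)
    (hcs0 : cs0 = pre ++ mid ++ cs) (hmid : ∀ x ∈ mid, x ≠ ['A', 'T', 'C']) :
    (((PySem.List.enumerate cs ((pre.length + mid.length : Nat) : Int)).filterMap
        (fun p => if p.2 = ['A', 'T', 'C'] then some p.1 else none)).foldl
      (fun (st : List String × Int) b =>
        (st.1 ++ [String.ofList (PySem.Chars.join []
            (PySem.List.slice cs0 (some st.2) (some (b + 1))))], b + 1))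
      (gs, (pre.length : Nat))).1
    = gs ++ (pvGenes cs mid.flatten).map String.ofList := by
  induction cs generalizing pre mid gs with
  | nil => simp [PySem.List.enumerate, pvGenes]
  | cons c cs ih =>
    rw [PySem.List.enumerate_cons]
    by_cases h : c = ['A', 'T', 'C']
    · -- boundary at index pre.length + mid.length
      have hslice : PySem.List.slice cs0 (some ((pre.length : Nat) : Int))
          (some (((pre.length + mid.length : Nat) : Int) + 1))
          = mid ++ [c] := by
        have h1 : (((pre.length + mid.length : Nat) : Int) + 1)
            = ((pre.length + (mid.length + 1) : Nat) : Int) := by push_cast; ring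
        rw [h1, PySem.List.slice_natCast, hcs0]
        rw [List.append_assoc, List.drop_left]
        have h2 : pre.length + (mid.length + 1) - pre.length = mid.length + 1 := by omega
        rw [h2]
        have h3 : mid ++ c :: cs = (mid ++ [c]) ++ cs := by simp
        rw [h3]
        have h4 : mid.length + 1 = (mid ++ [c]).length := by simp
        rw [h4, List.take_left]
      have hfm : ((((pre.length + mid.length : Nat) : Int), c) ::
            PySem.List.enumerate cs (((pre.length + mid.length : Nat) : Int) + 1)).filterMap
            (fun p => if p.2 = ['A', 'T', 'C'] then some p.1 else none)
          = ((pre.length + mid.length : Nat) : Int) ::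
            (PySem.List.enumerate cs (((pre.length + mid.length : Nat) : Int) + 1)).filterMap
            (fun p => if p.2 = ['A', 'T', 'C'] then some p.1 else none) := by
        simp [h]
      rw [hfm, List.foldl_cons]
      simp only []
      rw [hslice]
      have hstep := ih (pre ++ mid ++ [c]) []
        (gs ++ [String.ofList (PySem.Chars.join [] (mid ++ [c]))])
        (by simp [hcs0]) (by simp)
      have e1 : (((pre ++ mid ++ [c]).length : Nat) : Int)
          = ((pre.length + mid.length : Nat) : Int) + 1 := by simp; ring
      have e2 : (((pre ++ mid ++ [c]).length + ([] : List (List Char)).length : Nat) : Int)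
          = ((pre.length + mid.length : Nat) : Int) + 1 := by simp; ring
      rw [e1, e2] at hstep
      rw [hstep]
      simp [pvGenes, h, pvJoin_nil_eq_flatten]
    · have hfm : ((((pre.length + mid.length : Nat) : Int), c) ::
            PySem.List.enumerate cs (((pre.length + mid.length : Nat) : Int) + 1)).filterMap
            (fun p => if p.2 = ['A', 'T', 'C'] then some p.1 else none)
          = (PySem.List.enumerate cs (((pre.length + mid.length : Nat) : Int) + 1)).filterMap
            (fun p => if p.2 = ['A', 'T', 'C'] then some p.1 else none) := by
        simp [h]
      rw [hfm]
      have hstep := ih pre (mid ++ [c]) gs (by simp [hcs0])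
        (by intro x hx; rcases List.mem_append.mp hx with h' | h'
            · exact hmid x h'
            · simp at h'; simpa [h'] using h)
      have e1 : ((pre.length + (mid ++ [c]).length : Nat) : Int)
          = ((pre.length + mid.length : Nat) : Int) + 1 := by simp; ring
      rw [e1] at hstep
      rw [hstep]
      simp [pvGenes, h]

-- ===== VERDICT (by name: the statement is the Claim_ definition above) =====
theorem make_genes_spec : Claim_equal_make_genes := by
  intro genome _
  unfold Spec_make_genes make_genes make_genes_alt
  simp only []
  set g : List Char := genome.toList with hg
  set codons := (PySem.List.pyRange 0 (PySem.Chars.len g) 3).map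
      (fun j => PySem.List.slice g (some j) (some (j + 3))) with hcodons
  -- A's fold over the range is the fold of pvStepA over the codon list
  have hA : (PySem.List.pyRange 0 (PySem.Chars.len g) 3).foldl
      (fun (st : List (List Char) × Nat) j =>
        let codon := PySem.List.slice g (some j) (some (j + 3))
        if codon = ['A', 'T', 'C'] then
          (st.1.modify st.2 (· ++ codon) ++ [[]], st.2 + 1)
        else
          (st.1.modify st.2 (· ++ codon), st.2))
      ([[]], 0)
      = codons.foldl pvStepA ([[]], 0) := by
    rw [hcodons, List.foldl_map]
    rfl
  rw [hA, PySem.List.slice_to_neg_one]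
  have hAresult : (codons.foldl pvStepA ([[]], 0)).1.dropLast
      = pvGenes codons [] := by
    have := pvLemA codons [] []
    simpa using this
  rw [hAresult]
  have hB := pvLemB codons codons [] [] [] (by simp) (by simp)
  simpa using hB.symm
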